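-- pv_equiv track=rewrite | github.com/BlackAngelSk/discordbotlast | self updater/updater.py | _normalize_argv_start_cmd
-- ===== SOURCE A (Python) =====
-- def _normalize_argv_start_cmd(argv: list[str]) -> list[str]:
--     normalized: list[str] = []
--     index = 0
--
--     while index < len(argv):
--         arg = argv[index]
--
--         if arg == "--start-cmd":
--             normalized.append(arg)
--             index += 1
--
--             parts: list[str] = []
--             while index < len(argv):
--                 current = argv[index]
--                 if current.startswith("--"):
--                     break
--                 parts.append(current)
--                 index += 1
--
--             normalized.append(" ".join(parts).strip())
--             continue
--
--         if arg.startswith("--start-cmd="):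
--             _, value = arg.split("=", 1)
--             normalized.append(f"--start-cmd={value.strip()}")
--             index += 1
--             continue
--
--         normalized.append(arg)
--         index += 1
--
--     return normalized
-- ===== SOURCE B (Python) =====
-- def _normalize_argv_start_cmd(argv: list[str]) -> list[str]:
--     normalized: list[str] = []
--     collecting = False
--     parts: list[str] = []
--
--     for arg in argv:
--         if collecting:
--             if not arg.startswith("--"):
--                 parts.append(arg)
--                 continue
--             # a new flag ends collection: flush the joined parts, then
--             # fall through so this flag is handled by the normal branches
--             normalized.append(" ".join(parts).strip())
--             collecting = False
--             parts = []
--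
--         if arg == "--start-cmd":
--             normalized.append(arg)
--             collecting = True
--         elif arg.startswith("--start-cmd="):
--             _, value = arg.split("=", 1)
--             normalized.append(f"--start-cmd={value.strip()}")
--         else:
--             normalized.append(arg)
--
--     if collecting:
--         normalized.append(" ".join(parts).strip())
--     return normalized
-- ===== Notes on version B (the rewrite author's own statement) =====
-- stated objective: simpler
-- what changed: Replaced the index-based outer while with a nested inner while that consumes following args by a single flat for-loop over argv carrying a (collecting, parts) state, flushing the joined parts when a '--' flag or the end of argv is reached.
import Mathlib
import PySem

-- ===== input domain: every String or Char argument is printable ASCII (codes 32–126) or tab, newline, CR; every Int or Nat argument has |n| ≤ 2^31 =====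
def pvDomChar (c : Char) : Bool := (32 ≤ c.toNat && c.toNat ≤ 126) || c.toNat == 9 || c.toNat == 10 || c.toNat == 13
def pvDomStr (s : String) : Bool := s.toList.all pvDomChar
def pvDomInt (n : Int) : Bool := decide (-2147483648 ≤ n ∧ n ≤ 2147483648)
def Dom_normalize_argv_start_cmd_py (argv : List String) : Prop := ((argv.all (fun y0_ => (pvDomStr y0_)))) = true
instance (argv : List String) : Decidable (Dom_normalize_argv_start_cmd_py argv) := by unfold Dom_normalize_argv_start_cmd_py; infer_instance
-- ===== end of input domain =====

-- B replaces A's index-based nested-while scan with a single flat fold carrying a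
-- (collecting, parts) state that is flushed when a '--' flag (or the end) is hit; same values, simpler single pass.

-- ===== PORT A =====
-- inner 'while index < len(argv): ... if current.startswith("--"): break' loop:
-- returns (parts consumed, remaining suffix)
def takePartsA : List String → List String × List String
  | [] => ([], [])
  | c :: rest =>
    if PySem.Str.startswith c "--" then ([], c :: rest)
    else
      let pr := takePartsA rest
      (c :: pr.1, pr.2)

-- the suffix returned by the inner while is no longer than its input (termination of the outer loop)
theorem takePartsA_len (l : List String) : (takePartsA l).2.length ≤ l.length := by
  induction l with
  | nil => simp [takePartsA]
  | cons c rest ih =>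
    simp only [takePartsA]
    split
    · simp
    · simpa using Nat.le_succ_of_le ih

-- '_, value = arg.split("=", 1)': exact here since arg starts with "--start-cmd=",
-- so the split has exactly two pieces and value is piece 1
def splitValue (arg : String) : String :=
  ((PySem.Str.splitMax? arg "=" 1).getD []).getD 1 ""

def normalize_argv_start_cmd_py : List String → List String
  | [] => []
  | arg :: rest =>
    if arg = "--start-cmd" then
      let pr := takePartsA rest
      arg :: PySem.Str.strip (PySem.Str.join " " pr.1) :: normalize_argv_start_cmd_py pr.2
    else if PySem.Str.startswith arg "--start-cmd=" then
      ("--start-cmd=" ++ PySem.Str.strip (splitValue arg)) :: normalize_argv_start_cmd_py rest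
    else
      arg :: normalize_argv_start_cmd_py rest
termination_by l => l.length
decreasing_by
  · exact Nat.lt_succ_of_le (takePartsA_len rest)
  · simp
  · simp

-- ===== PORT B =====
-- state = (normalized, collecting, parts); one step of the flat for-loop
def stepB (st : List String × Bool × List String) (arg : String) : List String × Bool × List String :=
  if st.2.1 && !(PySem.Str.startswith arg "--") then
    (st.1, true, st.2.2 ++ [arg])          -- collecting: parts.append(arg); continue
  else
    -- flush pending parts if we were collecting, then the normal branches
    let normalized :=
      if st.2.1 then st.1 ++ [PySem.Str.strip (PySem.Str.join " " st.2.2)] else st.1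
    if arg = "--start-cmd" then (normalized ++ [arg], true, [])
    else if PySem.Str.startswith arg "--start-cmd=" then
      (normalized ++ ["--start-cmd=" ++ PySem.Str.strip (splitValue arg)], false, [])
    else (normalized ++ [arg], false, [])

def normalize_argv_start_cmd_py_alt (argv : List String) : List String :=
  let st := argv.foldl stepB ([], false, [])
  if st.2.1 then st.1 ++ [PySem.Str.strip (PySem.Str.join " " st.2.2)] else st.1

-- ===== PRECONDITION & SPEC =====
def Spec_normalize_argv_start_cmd_py (argv : List String) (out : List String) : Prop := out = normalize_argv_start_cmd_py_alt argv
instance (argv : List String) (out : List String) : Decidable (Spec_normalize_argv_start_cmd_py argv out) := by unfold Spec_normalize_argv_start_cmd_py; infer_instance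

-- ===== CLAIM (what is proved, stated in full; the proofs are below) =====
def Claim_equal_normalize_argv_start_cmd_py : Prop := ∀ (argv : List String), Dom_normalize_argv_start_cmd_py argv → Spec_normalize_argv_start_cmd_py argv (normalize_argv_start_cmd_py argv)

-- ===== LEMMAS AND PROOFS =====
-- run = fold the loop body over l from state st, then flush
def runB (l : List String) (st : List String × Bool × List String) : List String :=
  let st := l.foldl stepB st
  if st.2.1 then st.1 ++ [PySem.Str.strip (PySem.Str.join " " st.2.2)] else st.1

theorem runB_cons (c : String) (l : List String) (st : List String × Bool × List String) :
    runB (c :: l) st = runB l (stepB st c) := rfl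

-- while collecting, hitting a '--' flag behaves as if we had already flushed
theorem stepB_flag (c : String) (acc parts : List String)
    (h : PySem.Str.startswith c "--" = true) :
    stepB (acc, true, parts) c
      = stepB (acc ++ [PySem.Str.strip (PySem.Str.join " " parts)], false, []) c := by
  have hc : PySem.Chars.startswith c.toList ['-', '-'] = true := by simpa using h
  simp [stepB, hc]

-- the collecting phase of B consumes exactly takePartsA
theorem runB_collect (l : List String) : ∀ (acc parts : List String),
    runB l (acc, true, parts)
      = runB (takePartsA l).2
          (acc ++ [PySem.Str.strip (PySem.Str.join " " (parts ++ (takePartsA l).1))], false, []) := by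
  induction l with
  | nil => intro acc parts; simp [runB, takePartsA]
  | cons c rest ih =>
    intro acc parts
    by_cases h : PySem.Str.startswith c "--" = true
    · simp only [takePartsA, h, if_pos]
      rw [runB_cons, runB_cons, stepB_flag c acc parts h]
      simp
    · have h' : PySem.Str.startswith c "--" = false := by
        cases hb : PySem.Str.startswith c "--" <;> simp_all
      have hc : PySem.Chars.startswith c.toList ['-', '-'] = false := by simpa using h'
      rw [runB_cons]
      have hstep : stepB (acc, true, parts) c = (acc, true, parts ++ [c]) := by
        simp [stepB, hc]
      rw [hstep, ih acc (parts ++ [c])]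
      simp only [takePartsA, h', Bool.false_eq_true, reduceIte]
      simp [List.append_assoc]

theorem runB_eq_A : ∀ (n : Nat) (l : List String), l.length ≤ n → ∀ (acc : List String),
    runB l (acc, false, []) = acc ++ normalize_argv_start_cmd_py l := by
  intro n
  induction n with
  | zero =>
    intro l hl acc
    have : l = [] := List.length_eq_zero_iff.mp (Nat.le_zero.mp hl)
    subst this
    simp [runB, normalize_argv_start_cmd_py]
  | succ m ih =>
    intro l hl acc
    match l with
    | [] => simp [runB, normalize_argv_start_cmd_py]
    | arg :: rest =>
      have hrest : rest.length ≤ m := by simpa using Nat.le_of_succ_le_succ hl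
      by_cases h1 : arg = "--start-cmd"
      · rw [runB_cons]
        have hstep : stepB (acc, false, []) arg = (acc ++ [arg], true, []) := by
          simp [stepB, h1]
        rw [hstep, runB_collect rest (acc ++ [arg]) []]
        rw [ih (takePartsA rest).2 (le_trans (takePartsA_len rest) hrest)]
        simp [normalize_argv_start_cmd_py, h1]
      · by_cases h2 : PySem.Str.startswith arg "--start-cmd=" = true
        · have hc2 : PySem.Chars.startswith arg.toList
              ['-', '-', 's', 't', 'a', 'r', 't', '-', 'c', 'm', 'd', '='] = true := by
            simpa using h2
          rw [runB_cons]
          have hstep : stepB (acc, false, []) arg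
              = (acc ++ ["--start-cmd=" ++ PySem.Str.strip (splitValue arg)], false, []) := by
            simp [stepB, h1, hc2]
          rw [hstep, ih rest hrest]
          simp [normalize_argv_start_cmd_py, h1, hc2]
        · have hc2 : PySem.Chars.startswith arg.toList
              ['-', '-', 's', 't', 'a', 'r', 't', '-', 'c', 'm', 'd', '='] = false := by
            simpa using h2
          rw [runB_cons]
          have hstep : stepB (acc, false, []) arg = (acc ++ [arg], false, []) := by
            simp [stepB, h1, hc2]
          rw [hstep, ih rest hrest]
          simp [normalize_argv_start_cmd_py, h1, hc2]

-- ===== VERDICT (by name: the statement is the Claim_ definition above) =====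
theorem normalize_argv_start_cmd_py_spec : Claim_equal_normalize_argv_start_cmd_py := by
  intro argv _
  unfold Spec_normalize_argv_start_cmd_py
  have := runB_eq_A argv.length argv (le_refl _) []
  simpa [runB, normalize_argv_start_cmd_py_alt] using this.symm
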